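-- pv_equiv track=rewrite | github.com/zeun0725/Algorithm_Programmers | monthly_code_1/monthly_code_1_5.py | solution
-- ===== SOURCE A (Python) =====
-- def solution(s):
--     rm_cnt = 0
--     rm_idx = 0
--     while s != "1":
--         s1 = s.replace("0", "")
--         rm_cnt += len(s) - len(s1)
--         s = bin(len(s1))[2:]
--         rm_idx += 1
--
--     return [rm_idx, rm_cnt]
-- ===== SOURCE B (Python) =====
-- def solution(s):
--     if s == "1":
--         return [0, 0]
--     ones = sum(1 for c in s if c != '0')
--     # Bottom-up DP: steps[m] / zeros[m] = transformations and removed zeros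
--     # needed to reduce the binary representation of m down to "1".
--     steps = [0, 0]
--     zeros = [0, 0]
--     for m in range(2, ones + 1):
--         p = 0
--         length = 0
--         t = m
--         while t:
--             p += t & 1
--             length += 1
--             t >>= 1
--         steps.append(1 + steps[p])
--         zeros.append(length - p + zeros[p])
--     return [1 + steps[ones], (len(s) - ones) + zeros[ones]]
-- ===== Notes on version B (the rewrite author's own statement) =====
-- stated objective: alternative
-- what changed: B replaces following the transformation chain on the evolving binary string by a bottom-up dynamic-programming table: it tabulates steps[m]/zeros[m] for every m up to the initial count of non-'0' characters (each entry computed from the already-filled entry at popcount(m)) and reads the answer off the table, with no bin()/replace string manipulation.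
-- outside the precondition, e.g. on solution('0'): A does not finish within the time limit, B returns [1, 1]
import Mathlib
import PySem

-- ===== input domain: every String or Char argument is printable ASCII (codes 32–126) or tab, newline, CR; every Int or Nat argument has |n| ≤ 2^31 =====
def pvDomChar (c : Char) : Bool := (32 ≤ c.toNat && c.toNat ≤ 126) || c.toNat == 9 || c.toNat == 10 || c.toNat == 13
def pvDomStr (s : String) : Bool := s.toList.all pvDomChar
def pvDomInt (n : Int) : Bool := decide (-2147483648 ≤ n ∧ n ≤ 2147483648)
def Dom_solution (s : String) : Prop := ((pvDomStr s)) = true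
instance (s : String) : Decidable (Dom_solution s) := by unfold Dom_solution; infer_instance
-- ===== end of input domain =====

-- B replaces A's chain-following on the evolving binary string by a bottom-up DP table
-- indexed by the integer values; same results, no speed claim.

-- ===== PORT A =====
-- bin(k)[2:] for k ≥ 1, digit by digit (most significant first)
def pvBinGo : Nat → List Char
  | 0 => []
  | n + 1 => pvBinGo ((n + 1) / 2) ++ [if (n + 1) % 2 = 1 then '1' else '0']
decreasing_by exact Nat.div_lt_self (Nat.succ_pos n) one_lt_two

-- bin(k)[2:] (Python gives "0" for k = 0)
def pvBin (k : Nat) : List Char := if k = 0 then ['0'] else pvBinGo k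

-- A's while loop; fuel only makes the recursion total (within Pre_ it is never exhausted)
def pvALoop : Nat → List Char → Nat → Nat → List Int
  | 0, _, idx, cnt => [(idx : Int), (cnt : Int)]
  | fuel + 1, s, idx, cnt =>
    if s = ['1'] then [(idx : Int), (cnt : Int)]
    else
      let s1 := s.filter (fun c => c ≠ '0')
      pvALoop fuel (pvBin s1.length) (idx + 1) (cnt + (s.length - s1.length))

def solution (s : String) : List Int := pvALoop (s.toList.length + 2) s.toList 0 0

-- ===== PORT B =====
-- the inner `while t:` loop of Source B, popcount part (p)
def pvPop : Nat → Nat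
  | 0 => 0
  | n + 1 => (n + 1) % 2 + pvPop ((n + 1) / 2)
decreasing_by exact Nat.div_lt_self (Nat.succ_pos n) one_lt_two

-- the inner `while t:` loop of Source B, length part
def pvBlenGo : Nat → Nat
  | 0 => 0
  | n + 1 => 1 + pvBlenGo ((n + 1) / 2)
decreasing_by exact Nat.div_lt_self (Nat.succ_pos n) one_lt_two

-- one iteration of Source B's for-loop: append the entries for m to both tables
def pvStep (st : List Nat × List Nat) (m : Nat) : List Nat × List Nat :=
  let p := pvPop m
  let len := pvBlenGo m
  (st.1 ++ [1 + st.1.getD p 0], st.2 ++ [len - p + st.2.getD p 0])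

def solution_alt (s : String) : List Int :=
  if s.toList = ['1'] then [0, 0]
  else
    let ones := (s.toList.filter (fun c => c ≠ '0')).length
    -- range(2, ones + 1)
    let tab := (List.range' 2 (ones - 1)).foldl pvStep ([0, 0], [0, 0])
    [((1 + tab.1.getD ones 0 : Nat) : Int),
     ((s.toList.length - ones + tab.2.getD ones 0 : Nat) : Int)]

-- ===== PRECONDITION & SPEC =====
-- Pre_ excludes exactly the strings with no character other than '0' (incl. ""): on those A loops forever.
def Pre_solution (s : String) : Prop := (s.toList.any (fun c => c ≠ '0')) = true
instance (s : String) : Decidable (Pre_solution s) := by unfold Pre_solution; infer_instance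

def pvWitness_solution : String := "10"

def Spec_solution (s : String) (out : List Int) : Prop := out = solution_alt s
instance (s : String) (out : List Int) : Decidable (Spec_solution s out) := by unfold Spec_solution; infer_instance

-- ===== CLAIM (what is proved, stated in full; the proofs are below) =====
def Claim_equal_solution : Prop := ∀ (s : String), Dom_solution s → Pre_solution s → Spec_solution s (solution s)

-- ===== LEMMAS AND PROOFS =====

theorem pvPop_le (n : Nat) : pvPop n ≤ n := by
  induction n using Nat.strong_induction_on with
  | _ n ih =>
    match n with
    | 0 => simp [pvPop]
    | n + 1 =>
      have h := ih ((n + 1) / 2) (Nat.div_lt_self (Nat.succ_pos n) one_lt_two)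
      rw [pvPop]; omega

theorem pvPop_lt (n : Nat) (h2 : 2 ≤ n) : pvPop n < n := by
  match n, h2 with
  | n + 2, _ =>
    have h := pvPop_le ((n + 1 + 1) / 2)
    rw [pvPop]
    omega

theorem pvPop_pos (n : Nat) (h1 : 1 ≤ n) : 1 ≤ pvPop n := by
  induction n using Nat.strong_induction_on with
  | _ n ih =>
    match n, h1 with
    | n + 1, _ =>
      rw [pvPop]
      rcases Nat.mod_two_eq_zero_or_one (n + 1) with hm | hm
      · have hq : 1 ≤ (n + 1) / 2 := by omega
        have := ih ((n + 1) / 2) (Nat.div_lt_self (Nat.succ_pos n) one_lt_two) hq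
        omega
      · omega

-- reference function: (steps, zeros) needed to reduce bin(n) to "1"
def pvSZ (n : Nat) : Nat × Nat :=
  if n ≤ 1 then (0, 0)
  else
    let r := pvSZ (pvPop n)
    (1 + r.1, (pvBlenGo n - pvPop n) + r.2)
decreasing_by exact pvPop_lt n (by omega)

theorem pvBinGo_facts (n : Nat) :
    ((pvBinGo n).filter (fun c => c ≠ '0')).length = pvPop n ∧ (pvBinGo n).length = pvBlenGo n := by
  induction n using Nat.strong_induction_on with
  | _ n ih =>
    match n with
    | 0 => simp [pvBinGo, pvPop, pvBlenGo]
    | n + 1 =>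
      have h := ih ((n + 1) / 2) (Nat.div_lt_self (Nat.succ_pos n) one_lt_two)
      rw [pvBinGo, pvPop, pvBlenGo]
      refine ⟨?_, ?_⟩
      · rw [List.filter_append, List.length_append, h.1]
        rcases Nat.mod_two_eq_zero_or_one (n + 1) with hm | hm <;> simp [hm, Nat.add_comm]
      · rw [List.length_append, h.2]; simp [Nat.add_comm]

theorem pvBlenGo_ge (n : Nat) (h : 2 ≤ n) : 2 ≤ pvBlenGo n := by
  match n, h with
  | m + 2, _ =>
    rw [pvBlenGo]
    have : (m + 2) / 2 ≠ 0 := by omega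
    match hq : (m + 2) / 2, this with
    | q + 1, _ => rw [pvBlenGo]; omega

theorem pvBin_eq_one (n : Nat) : pvBin n = ['1'] ↔ n = 1 := by
  constructor
  · intro h
    by_contra hn
    rcases Nat.lt_or_ge n 2 with hlt | hge
    · interval_cases n <;> simp_all [pvBin, pvBinGo]
    · have h2 := pvBlenGo_ge n hge
      have hl : (pvBin n).length = 1 := by rw [h]; rfl
      have hn0 : n ≠ 0 := by omega
      rw [pvBin, if_neg hn0, (pvBinGo_facts n).2] at hl
      omega
  · rintro rfl; rw [pvBin]; norm_num; rw [pvBinGo, pvBinGo]; rfl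

-- A's loop starting at bin(n) computes pvSZ n, for 1 ≤ n ≤ fuel
theorem pvChain (fuel : Nat) : ∀ n idx cnt, 1 ≤ n → n ≤ fuel →
    pvALoop fuel (pvBin n) idx cnt = [((idx + (pvSZ n).1 : Nat) : Int), ((cnt + (pvSZ n).2 : Nat) : Int)] := by
  induction fuel with
  | zero => intro n idx cnt h1 h2; omega
  | succ f ih =>
    intro n idx cnt h1 h2
    rw [pvALoop]
    by_cases hn : n = 1
    · subst hn
      simp [(pvBin_eq_one 1).mpr rfl, pvSZ]
    · have h2n : 2 ≤ n := by omega
      have hne : pvBin n ≠ ['1'] := fun h => hn ((pvBin_eq_one n).mp h)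
      simp only [hne, if_false]
      have hn0 : n ≠ 0 := by omega
      have hf : ((pvBin n).filter (fun c => c ≠ '0')).length = pvPop n := by
        rw [pvBin, if_neg hn0]; exact (pvBinGo_facts n).1
      have hl : (pvBin n).length = pvBlenGo n := by
        rw [pvBin, if_neg hn0]; exact (pvBinGo_facts n).2
      have hsz : pvSZ n = (1 + (pvSZ (pvPop n)).1, (pvBlenGo n - pvPop n) + (pvSZ (pvPop n)).2) := by
        rw [pvSZ, if_neg (by omega : ¬ n ≤ 1)]
      rw [hf, hl, ih (pvPop n) (idx + 1) (cnt + (pvBlenGo n - pvPop n))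
            (pvPop_pos n h1) (by have := pvPop_lt n h2n; omega), hsz]
      simp only [List.cons.injEq, and_true]
      constructor <;> · push_cast; ring

-- B's table after processing range(2, m+2) holds pvSZ at every index < m + 2
theorem pvTab (m : Nat) :
    ((List.range' 2 m).foldl pvStep ([0, 0], [0, 0])).1.length = m + 2 ∧
    ((List.range' 2 m).foldl pvStep ([0, 0], [0, 0])).2.length = m + 2 ∧
    (∀ k, k < m + 2 →
      ((List.range' 2 m).foldl pvStep ([0, 0], [0, 0])).1.getD k 0 = (pvSZ k).1 ∧
      ((List.range' 2 m).foldl pvStep ([0, 0], [0, 0])).2.getD k 0 = (pvSZ k).2) := by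
  induction m with
  | zero =>
    refine ⟨rfl, rfl, ?_⟩
    intro k hk
    interval_cases k <;> simp [pvSZ, List.getD]
  | succ m ih =>
    rw [List.range'_concat]
    simp only [one_mul]
    rw [List.foldl_append]
    obtain ⟨hl1, hl2, hk⟩ := ih
    set t := (List.range' 2 m).foldl pvStep ([0, 0], [0, 0]) with ht
    simp only [List.foldl_cons, List.foldl_nil]
    have hp_lt : pvPop (2 + m) < m + 2 := by
      have := pvPop_lt (2 + m) (by omega); omega
    have hentry1 : (pvStep t (2 + m)).1 = t.1 ++ [1 + t.1.getD (pvPop (2 + m)) 0] := rfl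
    have hentry2 : (pvStep t (2 + m)).2 = t.2 ++ [pvBlenGo (2 + m) - pvPop (2 + m) + t.2.getD (pvPop (2 + m)) 0] := rfl
    refine ⟨?_, ?_, ?_⟩
    · rw [hentry1, List.length_append, hl1]; rfl
    · rw [hentry2, List.length_append, hl2]; rfl
    · intro k hkk
      rcases Nat.lt_or_ge k (m + 2) with hlt | hge
      · have h1 := (hk k hlt).1
        have h2 := (hk k hlt).2
        constructor
        · rw [hentry1, List.getD, List.getElem?_append_left (by omega)]
          rw [List.getD] at h1; exact h1
        · rw [hentry2, List.getD, List.getElem?_append_left (by omega)]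
          rw [List.getD] at h2; exact h2
      · have hkeq : k = m + 2 := by omega
        subst hkeq
        have hsz : pvSZ (m + 2) = (1 + (pvSZ (pvPop (m + 2))).1,
            (pvBlenGo (m + 2) - pvPop (m + 2)) + (pvSZ (pvPop (m + 2))).2) := by
          rw [pvSZ, if_neg (by omega : ¬ m + 2 ≤ 1)]
        have h2m : (2 + m) = (m + 2) := by omega
        rw [h2m] at hentry1 hentry2 hp_lt
        have ha := (hk (pvPop (m + 2)) hp_lt).1
        have hb := (hk (pvPop (m + 2)) hp_lt).2
        constructor
        · rw [h2m, hentry1, List.getD, List.getElem?_append_right (by omega), hl1]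
          simp [hsz]
          simpa [List.getD] using ha
        · rw [h2m, hentry2, List.getD, List.getElem?_append_right (by omega), hl2]
          simp [hsz]
          simpa [List.getD] using hb

-- ===== VERDICT (by name: the statement is the Claim_ definition above) =====
theorem solution_spec : Claim_equal_solution := by
  intro s _ hpre
  unfold Spec_solution solution solution_alt
  by_cases h : s.toList = ['1']
  · rw [h]; rfl
  · have hones1 : 1 ≤ (s.toList.filter (fun c => c ≠ '0')).length := by
      unfold Pre_solution at hpre
      rw [List.any_eq_true] at hpre
      obtain ⟨c, hc, hcn⟩ := hpre
      have hm : c ∈ s.toList.filter (fun c => c ≠ '0') := by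
        rw [List.mem_filter]; exact ⟨hc, hcn⟩
      have := List.length_pos_of_mem hm
      omega
    have hones_le : (s.toList.filter (fun c => c ≠ '0')).length ≤ s.toList.length :=
      List.length_filter_le _ _
    simp only [h, if_false]
    rw [pvALoop]
    simp only [h, if_false]
    generalize hOnes : (s.toList.filter (fun c => c ≠ '0')).length = ones at *
    rw [pvChain (s.toList.length + 1) ones (0 + 1) (0 + (s.toList.length - ones)) hones1
        (by omega)]
    obtain ⟨_, _, hk⟩ := pvTab (ones - 1)
    have hkk := hk ones (by omega)
    rw [hkk.1, hkk.2]
    norm_num
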